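-- pv_equiv track=rewrite | github.com/0-0Jay/algorithm | Algorithm_GroupStudy/프로그래머스/oil.py | solution
-- ===== SOURCE A (Python) =====
-- from collections import deque
--
-- d = [[-1, 0], [1, 0], [0, -1], [0, 1]]
--
-- def solution(land):
--     r = len(land)
--     c = len(land[0])
--     amount = [0 for _ in range(c)]
--
--     for i in range(r):
--         for j in range(c):
--             if land[i][j] == 1:
--                 tmp = {}
--                 cnt = 1
--                 que = deque()
--                 que.append([i, j])
--                 land[i][j] = 0
--                 while que:
--                     now = que.popleft()
--                     if now[1] not in tmp: tmp[now[1]] = 1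
--                     for t in range(4):
--                         nx = now[0] + d[t][0]
--                         ny = now[1] + d[t][1]
--                         if 0 <= nx < r and 0 <= ny < c and land[nx][ny] == 1:
--                             cnt += 1
--                             land[nx][ny] = 0
--                             que.append([nx, ny])
--                 for k in tmp:
--                     amount[k] += cnt
--
--     return max(amount)
-- ===== SOURCE B (Python) =====
-- # DFS with an explicit stack instead of a BFS deque, collecting each component once and
-- # computing the per-column amounts in a separate second phase from (size, column-set) pairs.
-- # Mutates `land` in place (zeroes every visited cell) exactly like the original.
-- def solution(land):
--     r = len(land)
--     c = len(land[0])
--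
--     def fill(i, j):
--         land[i][j] = 0
--         stack = [(i, j)]
--         comp = []
--         while stack:
--             x, y = stack.pop()
--             comp.append((x, y))
--             for nx, ny in ((x - 1, y), (x + 1, y), (x, y - 1), (x, y + 1)):
--                 if 0 <= nx < r and 0 <= ny < c and land[nx][ny] == 1:
--                     land[nx][ny] = 0
--                     stack.append((nx, ny))
--         return comp
--
--     comps = []
--     for i in range(r):
--         for j in range(c):
--             if land[i][j] == 1:
--                 comp = fill(i, j)
--                 comps.append((len(comp), {y for _, y in comp}))
--
--     amount = [sum(cnt for cnt, cols in comps if j in cols) for j in range(c)]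
--     return max(amount)
-- ===== Notes on version B (the rewrite author's own statement) =====
-- stated objective: alternative
-- what changed: BFS with a deque and an in-loop dict of columns is replaced by DFS with an explicit stack collecting each component as a list, and the per-column amounts are computed in a separate second phase from (size, column-set) pairs; order-independence of the flood fill is proved.
import Mathlib
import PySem

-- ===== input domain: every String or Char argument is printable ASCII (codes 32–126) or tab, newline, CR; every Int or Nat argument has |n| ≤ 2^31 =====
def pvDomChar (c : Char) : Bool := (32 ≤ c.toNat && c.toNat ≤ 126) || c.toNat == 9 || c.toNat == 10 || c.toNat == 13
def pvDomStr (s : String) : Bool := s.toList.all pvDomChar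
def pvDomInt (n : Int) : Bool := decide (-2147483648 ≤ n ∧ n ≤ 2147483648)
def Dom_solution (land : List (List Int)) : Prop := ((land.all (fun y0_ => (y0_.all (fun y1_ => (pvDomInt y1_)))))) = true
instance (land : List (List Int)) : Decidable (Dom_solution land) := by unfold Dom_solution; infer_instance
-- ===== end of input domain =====

-- B replaces the BFS deque flood fill by an explicit-stack DFS with a separate second phase
-- over (size, column-set) pairs; equivalence of the RETURN value is proved (the Python A
-- mutates `land` in place, and the Python B performs the same final mutation).

-- ===== PORT A =====
-- land[i][j] read; exact here because every index the ports use is provably in [0, len)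
-- (the loop/guard bounds), where Python's indexing agrees with getD/toNat.
def gval (g : List (List Int)) (i j : Int) : Int := (g.getD i.toNat []).getD j.toNat 0

-- land[i][j] = 0 (same in-range remark as gval)
def gset0 (g : List (List Int)) (i j : Int) : List (List Int) :=
  g.set i.toNat ((g.getD i.toNat []).set j.toNat 0)

-- number of cells equal to 1 (termination measure only)
def onesG (g : List (List Int)) : Nat := (g.map (fun row => row.countP (fun v => v == 1))).sum

-- indexing / counting helpers used by the ports' termination proofs and the equivalence proofs
theorem gval_in_range {g : List (List Int)} {i j : Int} (h : gval g i j = 1) :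
    i.toNat < g.length ∧ j.toNat < (g.getD i.toNat []).length := by
  unfold gval at h
  by_cases hi : i.toNat < g.length
  · refine ⟨hi, ?_⟩
    by_cases hj : j.toNat < (g.getD i.toNat []).length
    · exact hj
    · rw [List.getD_eq_getElem?_getD, List.getElem?_eq_none (by omega)] at h
      simp at h
  · rw [List.getD_eq_getElem?_getD (l := g), List.getElem?_eq_none (by omega)] at h
    simp at h

theorem getD_map' {A B : Type} (f : A → B) (l : List A) (n : Nat) (d : A) :
    (l.map f).getD n (f d) = f (l.getD n d) := by
  induction l generalizing n with
  | nil => rfl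
  | cons a t ih => cases n with
      | zero => rfl
      | succ n => simpa using ih n

theorem countP_set_lt (row : List Int) (m : Nat) (hm : m < row.length)
    (h1 : row.getD m 0 = 1) :
    (row.set m 0).countP (fun v => v == 1) < row.countP (fun v => v == 1) := by
  induction row generalizing m with
  | nil => simp at hm
  | cons a t ih =>
      cases m with
      | zero =>
          simp only [List.getD] at h1
          simp at h1
          subst h1
          simp [List.countP_cons]
      | succ m =>
          simp only [List.length_cons, Nat.add_lt_add_iff_right] at hm
          have h1' : t.getD m 0 = 1 := h1
          have := ih m hm h1'
          simp only [List.set, List.countP_cons]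
          omega

theorem sum_set_lt (l : List Nat) (n : Nat) (a : Nat) (hn : n < l.length)
    (ha : a < l.getD n 0) :
    (l.set n a).sum < l.sum := by
  induction l generalizing n with
  | nil => simp at hn
  | cons b t ih =>
      cases n with
      | zero =>
          simp only [List.set, List.sum_cons]
          simp only [List.getD] at ha
          simp at ha
          omega
      | succ n =>
          simp only [List.length_cons, Nat.add_lt_add_iff_right] at hn
          have ha' : a < t.getD n 0 := ha
          have := ih n hn ha'
          simp only [List.set, List.sum_cons]
          omega

theorem ones_gset0_lt' (g : List (List Int)) (i j : Int) (h : gval g i j = 1) :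
    onesG (gset0 g i j) < onesG g := by
  obtain ⟨hi, hj⟩ := gval_in_range h
  have hcell : (g.getD i.toNat []).getD j.toNat 0 = 1 := h
  unfold onesG gset0
  rw [List.map_set]
  apply sum_set_lt _ _ _ (by simpa using hi)
  have hd := getD_map' (fun row => row.countP (fun v => v == 1)) g i.toNat []
  simp only [List.countP_nil] at hd
  rw [hd]
  exact countP_set_lt _ _ hj hcell

-- d = [[-1,0],[1,0],[0,-1],[0,1]]
def dirsA : List (Int × Int) := [(-1, 0), (1, 0), (0, -1), (0, 1)]

-- the body 'for t in range(4): …' of A's while loop, state (land, cnt, que-to-the-right-of-now)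
def bfsStep (r c : Int) (now : Int × Int) (s : List (List Int) × Int × List (Int × Int)) :
    List (List Int) × Int × List (Int × Int) :=
  dirsA.foldl (fun s t =>
    let nx := now.1 + t.1
    let ny := now.2 + t.2
    if 0 ≤ nx ∧ nx < r ∧ 0 ≤ ny ∧ ny < c ∧ gval s.1 nx ny = 1 then
      (gset0 s.1 nx ny, s.2.1 + 1, s.2.2 ++ [(nx, ny)])
    else s) s

theorem bfsStep_measure(r c : Int) (now : Int × Int) (g : List (List Int)) (cnt : Int)
    (que : List (Int × Int)) :
    2 * onesG (bfsStep r c now (g, cnt, que)).1 + (bfsStep r c now (g, cnt, que)).2.2.length ≤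
      2 * onesG g + que.length := by
  unfold bfsStep
  generalize dirsA = l
  induction l generalizing g cnt que with
  | nil => simp
  | cons t l ih =>
      simp only [List.foldl_cons]
      split
      · rename_i hg
        refine le_trans (ih _ _ _) ?_
        have := ones_gset0_lt' g (now.1 + t.1) (now.2 + t.2) hg.2.2.2.2
        simp only [List.length_append, List.length_cons, List.length_nil]
        omega
      · exact ih _ _ _

-- the 'while que:' loop of A
def bfsA (r c : Int) (g : List (List Int)) (tmp : PySem.Dict Int Int) (cnt : Int)
    (que : List (Int × Int)) : List (List Int) × PySem.Dict Int Int × Int :=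
  match que with
  | [] => (g, tmp, cnt)
  | now :: rest =>
      -- if now[1] not in tmp: tmp[now[1]] = 1
      let tmp' := if tmp.contains now.2 then tmp else tmp.insert now.2 1
      let s := bfsStep r c now (g, cnt, rest)
      bfsA r c s.1 tmp' s.2.1 s.2.2
termination_by 2 * onesG g + que.length
decreasing_by
  have hm := bfsStep_measure r c now g cnt rest
  simp only [List.length_cons]
  omega

def solution (land : List (List Int)) : Int :=
  let r : Int := land.length
  let c : Int := (land.getD 0 []).length   -- len(land[0]); Python raises on an empty grid (outside Pre_)
  let init : List Int := (PySem.List.pyRange 0 c 1).map (fun _ => (0 : Int))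
  let res := (PySem.List.pyRange 0 r 1).foldl (fun st i =>
    (PySem.List.pyRange 0 c 1).foldl (fun st j =>
      if gval st.1 i j = 1 then
        let out := bfsA r c (gset0 st.1 i j) PySem.Dict.empty 1 [(i, j)]
        -- for k in tmp: amount[k] += cnt   (k is always a column index in [0, c))
        let amount' := out.2.1.keys.foldl
          (fun a k => a.set k.toNat (a.getD k.toNat 0 + out.2.2)) st.2
        (out.1, amount')
      else st) st) (land, init)
  -- max(amount); amount is nonempty on Pre_ (c > 0)
  (PySem.List.max? res.2 (fun x => x)).getD 0

-- ===== PORT B =====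
-- the body 'for nx, ny in ((x-1,y),(x+1,y),(x,y-1),(x,y+1)): …', state (land, stack)
def dfsStep (r c x y : Int) (s : List (List Int) × List (Int × Int)) :
    List (List Int) × List (Int × Int) :=
  [(x - 1, y), (x + 1, y), (x, y - 1), (x, y + 1)].foldl (fun s p =>
    if 0 ≤ p.1 ∧ p.1 < r ∧ 0 ≤ p.2 ∧ p.2 < c ∧ gval s.1 p.1 p.2 = 1 then
      (gset0 s.1 p.1 p.2, s.2 ++ [p])
    else s) s

theorem dfsStep_measure (r c x y : Int) (g : List (List Int)) (stk : List (Int × Int)) :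
    2 * onesG (dfsStep r c x y (g, stk)).1 + (dfsStep r c x y (g, stk)).2.length ≤
      2 * onesG g + stk.length := by
  unfold dfsStep
  generalize [(x - 1, y), (x + 1, y), (x, y - 1), (x, y + 1)] = l
  induction l generalizing g stk with
  | nil => simp
  | cons t l ih =>
      simp only [List.foldl_cons]
      split
      · rename_i hg
        refine le_trans (ih _ _) ?_
        have := ones_gset0_lt' g t.1 t.2 hg.2.2.2.2
        simp only [List.length_append, List.length_cons, List.length_nil]
        omega
      · exact ih _ _

-- the 'while stack:' loop of B; stack.pop() pops the LAST element
def dfsB (r c : Int) (g : List (List Int)) (stack : List (Int × Int))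
    (comp : List (Int × Int)) : List (List Int) × List (Int × Int) :=
  match h : stack.getLast? with
  | none => (g, comp)
  | some xy =>
      let rest := stack.dropLast
      let s := dfsStep r c xy.1 xy.2 (g, rest)
      dfsB r c s.1 s.2 (comp ++ [xy])
termination_by 2 * onesG g + stack.length
decreasing_by
  have hm := dfsStep_measure r c xy.1 xy.2 g stack.dropLast
  have hne : stack ≠ [] := by
    intro hnil; rw [hnil] at h; simp at h
  have hlen : stack.dropLast.length = stack.length - 1 := by
    simp [List.length_dropLast]
  have hpos : 0 < stack.length := List.length_pos_iff.mpr hne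
  omega

def solution_alt (land : List (List Int)) : Int :=
  let r : Int := land.length
  let c : Int := (land.getD 0 []).length
  let res := (PySem.List.pyRange 0 r 1).foldl (fun st i =>
    (PySem.List.pyRange 0 c 1).foldl (fun st j =>
      if gval st.1 i j = 1 then
        let out := dfsB r c (gset0 st.1 i j) [(i, j)] []
        -- comps.append((len(comp), {y for _, y in comp}))
        (out.1, st.2 ++ [((out.2.length : Int), PySem.Set.ofList (out.2.map (·.2)))])
      else st) st) (land, ([] : List (Int × PySem.Set Int)))
  -- amount = [sum(cnt for cnt, cols in comps if j in cols) for j in range(c)]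
  let amount := (PySem.List.pyRange 0 c 1).map
    (fun j => ((res.2.filter (fun pc => PySem.Set.contains pc.2 j)).map (·.1)).sum)
  (PySem.List.max? amount (fun x => x)).getD 0

-- ===== PRECONDITION & SPEC =====
-- Exactly the inputs on which Python A returns: A raises IndexError on an empty grid and
-- on a row shorter than the first row, and ValueError (max of an empty list) when the
-- first row is empty.
def Pre_solution (land : List (List Int)) : Prop :=
  land ≠ [] ∧ 0 < (land.headD []).length ∧ ∀ row ∈ land, (land.headD []).length ≤ row.length
instance (land : List (List Int)) : Decidable (Pre_solution land) := by
  unfold Pre_solution; infer_instance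
def pvWitness_solution : List (List Int) := [[1, 0], [0, 1]]

def Spec_solution (land : List (List Int)) (out : Int) : Prop := out = solution_alt land
instance (land : List (List Int)) (out : Int) : Decidable (Spec_solution land out) := by
  unfold Spec_solution; infer_instance

-- ===== CLAIM (what is proved, stated in full; the proofs are below) =====
def Claim_equal_solution : Prop := ∀ (land : List (List Int)), Dom_solution land →
  Pre_solution land → Spec_solution land (solution land)

-- ===== LEMMAS AND PROOFS =====

theorem getD_set_self {α : Type} (l : List α) (n : Nat) (a d : α) (h : n < l.length) :
    (l.set n a).getD n d = a := by
  rw [List.getD_eq_getElem?_getD, List.getElem?_set_self (by omega)]; rfl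

theorem getD_set_same {α : Type} (l : List α) (n : Nat) (a d : α) :
    (l.set n a).getD n d = if n < l.length then a else d := by
  split
  · exact getD_set_self l n a d ‹_›
  · rw [List.getD_eq_getElem?_getD, List.getElem?_eq_none (by simp; omega)]; rfl

theorem getD_set_ne {α : Type} (l : List α) {m n : Nat} (a d : α) (h : m ≠ n) :
    (l.set m a).getD n d = l.getD n d := by
  rw [List.getD_eq_getElem?_getD, List.getElem?_set_ne h, ← List.getD_eq_getElem?_getD]

theorem length_gset0 (g : List (List Int)) (i j : Int) : (gset0 g i j).length = g.length := by
  simp [gset0]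

theorem rowlen_gset0 (g : List (List Int)) (i j : Int) (n : Nat) :
    ((gset0 g i j).getD n []).length = (g.getD n []).length := by
  unfold gset0
  by_cases h : i.toNat = n
  · subst h
    rw [getD_set_same]
    split
    · simp
    · rw [List.getD_eq_getElem?_getD (l := g), List.getElem?_eq_none (by omega)]
      simp
  · rw [getD_set_ne _ _ _ h]

theorem gval_gset0_self (g : List (List Int)) (i j : Int) : gval (gset0 g i j) i j = 0 := by
  unfold gval gset0
  rw [getD_set_same]
  split
  · rw [getD_set_same]
    split
    · rfl
    · simp
  · simp

theorem gval_gset0_ne (g : List (List Int)) {i j a b : Int}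
    (h : i.toNat ≠ a.toNat ∨ j.toNat ≠ b.toNat) :
    gval (gset0 g i j) a b = gval g a b := by
  unfold gval gset0
  rcases h with h | h
  · rw [getD_set_ne _ _ _ h]
  · by_cases hi : i.toNat = a.toNat
    · rw [hi, getD_set_same]
      split
      · rw [getD_set_ne _ _ _ h]
      · rw [List.getD_eq_getElem?_getD (l := g), List.getElem?_eq_none (by omega)]
        simp
    · rw [getD_set_ne _ _ _ hi]

-- ---------- flood-fill semantics: the guard, neighbours, zeroing a set of cells ----------

-- the candidate neighbour cells of x, in the order both programs try them
def cellsOf (x : Int × Int) : List (Int × Int) :=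
  [(x.1 - 1, x.2), (x.1 + 1, x.2), (x.1, x.2 - 1), (x.1, x.2 + 1)]

-- the common guard '0 <= nx < r and 0 <= ny < c and land[nx][ny] == 1'
def Gd (r c : Int) (g : List (List Int)) (p : Int × Int) : Prop :=
  0 ≤ p.1 ∧ p.1 < r ∧ 0 ≤ p.2 ∧ p.2 < c ∧ gval g p.1 p.2 = 1

def GdB (r c : Int) (g : List (List Int)) (p : Int × Int) : Bool :=
  decide (0 ≤ p.1 ∧ p.1 < r ∧ 0 ≤ p.2 ∧ p.2 < c ∧ gval g p.1 p.2 = 1)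

theorem GdB_iff {r c : Int} {g : List (List Int)} {p : Int × Int} :
    GdB r c g p = true ↔ Gd r c g p := by
  simp [GdB, Gd]

def nbrs (r c : Int) (g : List (List Int)) (x : Int × Int) : List (Int × Int) :=
  (cellsOf x).filter (GdB r c g)

def zeroCells (g : List (List Int)) (l : List (Int × Int)) : List (List Int) :=
  l.foldl (fun g p => gset0 g p.1 p.2) g

theorem length_zeroCells (l : List (Int × Int)) : ∀ g, (zeroCells g l).length = g.length := by
  induction l with
  | nil => intro g; rfl
  | cons p l ih => intro g; simpa [zeroCells, List.foldl_cons, length_gset0]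
      using (ih (gset0 g p.1 p.2)).trans (length_gset0 g p.1 p.2)

theorem rowlen_zeroCells (l : List (Int × Int)) : ∀ g (n : Nat),
    ((zeroCells g l).getD n []).length = (g.getD n []).length := by
  induction l with
  | nil => intro g n; rfl
  | cons p l ih => intro g n
                   exact (ih (gset0 g p.1 p.2) n).trans (rowlen_gset0 g p.1 p.2 n)

theorem gval_congr_toNat (g : List (List Int)) {a b i j : Int}
    (h1 : a.toNat = i.toNat) (h2 : b.toNat = j.toNat) : gval g a b = gval g i j := by
  unfold gval; rw [h1, h2]

theorem gval_zeroCells (l : List (Int × Int)) : ∀ g (a b : Int),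
    gval (zeroCells g l) a b =
      if (∃ p ∈ l, p.1.toNat = a.toNat ∧ p.2.toNat = b.toNat) then 0 else gval g a b := by
  induction l with
  | nil => intro g a b; simp [zeroCells]
  | cons p l ih =>
      intro g a b
      have hz : zeroCells g (p :: l) = zeroCells (gset0 g p.1 p.2) l := rfl
      rw [hz, ih]
      by_cases hex : ∃ q ∈ l, q.1.toNat = a.toNat ∧ q.2.toNat = b.toNat
      · rw [if_pos hex, if_pos (by rcases hex with ⟨q, hq, hq2⟩; exact ⟨q, List.mem_cons_of_mem _ hq, hq2⟩)]
      · rw [if_neg hex]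
        by_cases hp : p.1.toNat = a.toNat ∧ p.2.toNat = b.toNat
        · rw [if_pos ⟨p, List.mem_cons_self, hp⟩]
          rw [gval_congr_toNat (gset0 g p.1 p.2) hp.1.symm hp.2.symm]
          exact gval_gset0_self g p.1 p.2
        · rw [if_neg (by rintro ⟨q, hq, hq2⟩
                         rcases List.mem_cons.mp hq with rfl | hq
                         · exact hp hq2
                         · exact hex ⟨q, hq, hq2⟩)]
          exact gval_gset0_ne g (by omega)

theorem gval_zeroCells_of_mem {l : List (Int × Int)} {p : Int × Int} (g : List (List Int))
    (h : p ∈ l) : gval (zeroCells g l) p.1 p.2 = 0 := by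
  rw [gval_zeroCells]; exact if_pos ⟨p, h, rfl, rfl⟩

theorem gval_zeroCells_of_not_mem {l : List (Int × Int)} {a b : Int} (g : List (List Int))
    (hl : ∀ q ∈ l, 0 ≤ q.1 ∧ 0 ≤ q.2) (ha : 0 ≤ a) (hb : 0 ≤ b) (h : (a, b) ∉ l) :
    gval (zeroCells g l) a b = gval g a b := by
  rw [gval_zeroCells]
  refine if_neg ?_
  rintro ⟨q, hq, h1, h2⟩
  obtain ⟨hq1, hq2⟩ := hl q hq
  have : q = (a, b) := by
    have e1 : q.1 = a := by omega
    have e2 : q.2 = b := by omega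
    exact Prod.ext e1 e2
  exact h (this ▸ hq)

theorem gval_zeroCells_eq_one {l : List (Int × Int)} {a b : Int} {g : List (List Int)}
    (h : gval (zeroCells g l) a b = 1) : gval g a b = 1 := by
  rw [gval_zeroCells] at h
  split at h
  · exact absurd h (by norm_num)
  · exact h

-- ---------- connectivity ----------

def Adj (x p : Int × Int) : Prop :=
  p = (x.1 - 1, x.2) ∨ p = (x.1 + 1, x.2) ∨ p = (x.1, x.2 - 1) ∨ p = (x.1, x.2 + 1)

def Step (r c : Int) (g : List (List Int)) (x p : Int × Int) : Prop :=
  Adj x p ∧ Gd r c g p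

def Conn (r c : Int) (g : List (List Int)) (q : List (Int × Int)) (p : Int × Int) : Prop :=
  ∃ s ∈ q, Relation.ReflTransGen (Step r c g) s p

theorem mem_nbrs {r c : Int} {g : List (List Int)} {x p : Int × Int} :
    p ∈ nbrs r c g x ↔ Step r c g x p := by
  simp [nbrs, cellsOf, GdB, List.mem_filter, Step, Adj, Gd, or_and_right]

theorem nbrs_nodup (r c : Int) (g : List (List Int)) (x : Int × Int) :
    (nbrs r c g x).Nodup := by
  apply List.Nodup.filter
  simp [cellsOf, Prod.ext_iff]
  omega

theorem conn_congr {r c : Int} {g : List (List Int)} {q q' : List (Int × Int)}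
    (h : ∀ s, s ∈ q ↔ s ∈ q') (p : Int × Int) :
    Conn r c g q p ↔ Conn r c g q' p := by
  unfold Conn
  constructor
  · rintro ⟨s, hs, hp⟩; exact ⟨s, (h s).mp hs, hp⟩
  · rintro ⟨s, hs, hp⟩; exact ⟨s, (h s).mpr hs, hp⟩


theorem conn_cases {r c : Int} {g : List (List Int)} {q : List (Int × Int)} {p : Int × Int}
    (h : Conn r c g q p) : p ∈ q ∨ Gd r c g p := by
  obtain ⟨s, hs, hp⟩ := h
  rcases Relation.ReflTransGen.cases_tail hp with rfl | ⟨b, _, hstep⟩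
  · exact Or.inl hs
  · exact Or.inr hstep.2

theorem step_mono_zeroCells {r c : Int} {g : List (List Int)} {l : List (Int × Int)}
    {x p : Int × Int} (h : Step r c (zeroCells g l) x p) : Step r c g x p := by
  obtain ⟨ha, h1, h2, h3, h4, h5⟩ := h
  exact ⟨ha, h1, h2, h3, h4, gval_zeroCells_eq_one h5⟩

theorem nbrs_nonneg {r c : Int} {g : List (List Int)} {x : Int × Int} :
    ∀ q ∈ nbrs r c g x, 0 ≤ q.1 ∧ 0 ≤ q.2 := by
  intro q hq
  have := (mem_nbrs.mp hq).2
  exact ⟨this.1, this.2.2.1⟩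

-- the crux: popping x and zeroing its fresh neighbours preserves overall connectivity
theorem conn_step (r c : Int) (g : List (List Int)) (x : Int × Int) (q q' : List (Int × Int))
    (hq' : ∀ p, p ∈ q' ↔ p ∈ q ∨ p ∈ nbrs r c g x) (p : Int × Int) :
    Conn r c g (x :: q) p ↔ p = x ∨ Conn r c (zeroCells g (nbrs r c g x)) q' p := by
  constructor
  · rintro ⟨s, hs, hpath⟩
    induction hpath with
    | refl =>
        rcases List.mem_cons.mp hs with rfl | hsq
        · exact Or.inl rfl
        · exact Or.inr ⟨s, (hq' s).mpr (Or.inl hsq), Relation.ReflTransGen.refl⟩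
    | tail hab hstep ih =>
        rename_i b y
        by_cases hyN : y ∈ nbrs r c g x
        · exact Or.inr ⟨y, (hq' y).mpr (Or.inr hyN), Relation.ReflTransGen.refl⟩
        · rcases ih with rfl | ⟨s', hs', hpath'⟩
          · exact absurd (mem_nbrs.mpr hstep) hyN
          · have hGd : Gd r c g y := hstep.2
            have hval : gval (zeroCells g (nbrs r c g x)) y.1 y.2 = gval g y.1 y.2 := by
              have := gval_zeroCells_of_not_mem (l := nbrs r c g x) g nbrs_nonneg
                hGd.1 hGd.2.2.1 (by simpa using hyN)
              simpa using this
            have hstep' : Step r c (zeroCells g (nbrs r c g x)) b y :=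
              ⟨hstep.1, hGd.1, hGd.2.1, hGd.2.2.1, hGd.2.2.2.1, by rw [hval]; exact hGd.2.2.2.2⟩
            exact Or.inr ⟨s', hs', hpath'.tail hstep'⟩
  · rintro (rfl | ⟨s, hs, hpath⟩)
    · exact ⟨p, List.mem_cons_self, Relation.ReflTransGen.refl⟩
    · have hpath' : Relation.ReflTransGen (Step r c g) s p :=
        Relation.ReflTransGen.mono (fun _ _ h => step_mono_zeroCells h) hpath
      rcases (hq' s).mp hs with hsq | hsN
      · exact ⟨s, List.mem_cons_of_mem _ hsq, hpath'⟩
      · exact ⟨x, List.mem_cons_self, Relation.ReflTransGen.head (mem_nbrs.mp hsN) hpath'⟩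


-- ---------- the inner for-loops compute: zero the fresh neighbours, append them ----------

theorem filter_GdB_gset0 {r c : Int} {g : List (List Int)} {p : Int × Int}
    (hp : Gd r c g p) (l : List (Int × Int)) (hpl : p ∉ l) :
    l.filter (GdB r c (gset0 g p.1 p.2)) = l.filter (GdB r c g) := by
  apply List.filter_congr
  intro q hq
  by_cases hw : 0 ≤ q.1 ∧ q.1 < r ∧ 0 ≤ q.2 ∧ q.2 < c
  · have hne : q ≠ p := fun h => hpl (h ▸ hq)
    have : gval (gset0 g p.1 p.2) q.1 q.2 = gval g q.1 q.2 := by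
      apply gval_gset0_ne
      have h1 : 0 ≤ p.1 := hp.1
      have h2 : 0 ≤ p.2 := hp.2.2.1
      have : q.1 ≠ p.1 ∨ q.2 ≠ p.2 := by
        by_contra hcon
        push_neg at hcon
        exact hne (Prod.ext hcon.1 hcon.2)
      omega
    simp [GdB, this]
  · have h1 : GdB r c (gset0 g p.1 p.2) q = false := by
      simp only [GdB, decide_eq_false_iff_not]
      tauto
    have h2 : GdB r c g q = false := by
      simp only [GdB, decide_eq_false_iff_not]
      tauto
    rw [h1, h2]

theorem foldl_cells_bfs (r c : Int) (cells : List (Int × Int)) (hnd : cells.Nodup) :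
    ∀ g (cnt : Int) (que : List (Int × Int)),
    cells.foldl (fun s p =>
        if 0 ≤ p.1 ∧ p.1 < r ∧ 0 ≤ p.2 ∧ p.2 < c ∧ gval s.1 p.1 p.2 = 1 then
          (gset0 s.1 p.1 p.2, s.2.1 + 1, s.2.2 ++ [p])
        else s) (g, cnt, que)
      = (zeroCells g (cells.filter (GdB r c g)),
         cnt + (cells.filter (GdB r c g)).length,
         que ++ cells.filter (GdB r c g)) := by
  induction cells with
  | nil => intro g cnt que; simp [zeroCells]
  | cons p l ih =>
      intro g cnt que
      obtain ⟨hpl, hl⟩ := List.nodup_cons.mp hnd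
      simp only [List.foldl_cons]
      by_cases hg : 0 ≤ p.1 ∧ p.1 < r ∧ 0 ≤ p.2 ∧ p.2 < c ∧ gval g p.1 p.2 = 1
      · rw [if_pos hg]
        rw [ih hl (gset0 g p.1 p.2) (cnt + 1) (que ++ [p])]
        rw [filter_GdB_gset0 hg l hpl]
        have hfil : (p :: l).filter (GdB r c g) = p :: l.filter (GdB r c g) := by
          rw [List.filter_cons_of_pos (GdB_iff.mpr hg)]
        rw [hfil]
        refine congrArg₂ _ rfl (congrArg₂ _ ?_ ?_)
        · simp only [List.length_cons]
          push_cast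
          ring
        · simp
      · rw [if_neg hg]
        rw [ih hl g cnt que]
        have hfil : (p :: l).filter (GdB r c g) = l.filter (GdB r c g) := by
          rw [List.filter_cons_of_neg (by simpa [GdB_iff, Gd] using hg)]
        rw [hfil]

theorem foldl_cells_dfs (r c : Int) (cells : List (Int × Int)) (hnd : cells.Nodup) :
    ∀ g (stk : List (Int × Int)),
    cells.foldl (fun s p =>
        if 0 ≤ p.1 ∧ p.1 < r ∧ 0 ≤ p.2 ∧ p.2 < c ∧ gval s.1 p.1 p.2 = 1 then
          (gset0 s.1 p.1 p.2, s.2 ++ [p])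
        else s) (g, stk)
      = (zeroCells g (cells.filter (GdB r c g)), stk ++ cells.filter (GdB r c g)) := by
  induction cells with
  | nil => intro g stk; simp [zeroCells]
  | cons p l ih =>
      intro g stk
      obtain ⟨hpl, hl⟩ := List.nodup_cons.mp hnd
      simp only [List.foldl_cons]
      by_cases hg : 0 ≤ p.1 ∧ p.1 < r ∧ 0 ≤ p.2 ∧ p.2 < c ∧ gval g p.1 p.2 = 1
      · rw [if_pos hg]
        rw [ih hl (gset0 g p.1 p.2) (stk ++ [p])]
        rw [filter_GdB_gset0 hg l hpl]
        rw [List.filter_cons_of_pos (GdB_iff.mpr hg)]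
        have hzc : zeroCells g (p :: List.filter (GdB r c g) l) =
            zeroCells (gset0 g p.1 p.2) (List.filter (GdB r c g) l) := rfl
        rw [hzc]
        simp
      · rw [if_neg hg]
        rw [ih hl g stk]
        rw [List.filter_cons_of_neg (by simpa [GdB_iff, Gd] using hg)]

theorem cellsOf_nodup (x : Int × Int) : (cellsOf x).Nodup := by
  simp [cellsOf, Prod.ext_iff]
  omega

theorem bfsStep_spec (r c : Int) (now : Int × Int) (g : List (List Int)) (cnt : Int)
    (que : List (Int × Int)) :
    bfsStep r c now (g, cnt, que) =
      (zeroCells g (nbrs r c g now), cnt + (nbrs r c g now).length, que ++ nbrs r c g now) := by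
  have he : bfsStep r c now (g, cnt, que) =
      (cellsOf now).foldl (fun s p =>
        if 0 ≤ p.1 ∧ p.1 < r ∧ 0 ≤ p.2 ∧ p.2 < c ∧ gval s.1 p.1 p.2 = 1 then
          (gset0 s.1 p.1 p.2, s.2.1 + 1, s.2.2 ++ [p])
        else s) (g, cnt, que) := by
    simp only [bfsStep, dirsA, cellsOf, List.foldl_cons, List.foldl_nil, add_zero,
      ← sub_eq_add_neg]
  rw [he, foldl_cells_bfs r c (cellsOf now) (cellsOf_nodup now)]
  rfl

theorem dfsStep_spec (r c : Int) (xy : Int × Int) (g : List (List Int))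
    (stk : List (Int × Int)) :
    dfsStep r c xy.1 xy.2 (g, stk) =
      (zeroCells g (nbrs r c g xy), stk ++ nbrs r c g xy) := by
  have he : dfsStep r c xy.1 xy.2 (g, stk) =
      (cellsOf xy).foldl (fun s p =>
        if 0 ≤ p.1 ∧ p.1 < r ∧ 0 ≤ p.2 ∧ p.2 < c ∧ gval s.1 p.1 p.2 = 1 then
          (gset0 s.1 p.1 p.2, s.2 ++ [p])
        else s) (g, stk) := by
    simp only [dfsStep, cellsOf, List.foldl_cons, List.foldl_nil]
  rw [he, foldl_cells_dfs r c (cellsOf xy) (cellsOf_nodup xy)]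
  rfl


-- ---------- invariants and the characterisation of both fills ----------

def Window (r c : Int) (p : Int × Int) : Prop :=
  0 ≤ p.1 ∧ p.1 < r ∧ 0 ≤ p.2 ∧ p.2 < c

-- the worklist invariant: pending cells are distinct, in the window, already zeroed
def InvQ (r c : Int) (g : List (List Int)) (q : List (Int × Int)) : Prop :=
  q.Nodup ∧ ∀ p ∈ q, Window r c p ∧ gval g p.1 p.2 = 0

-- what the final grid looks like: the connected region zeroed, everything else untouched
def GridOut (r c : Int) (g : List (List Int)) (q : List (Int × Int))
    (g' : List (List Int)) : Prop :=
  g'.length = g.length ∧ (∀ n : Nat, (g'.getD n []).length = (g.getD n []).length) ∧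
  (∀ a b : Nat,
    (Conn r c g q ((a : Int), (b : Int)) → gval g' (a : Int) (b : Int) = 0) ∧
    (¬ Conn r c g q ((a : Int), (b : Int)) →
      gval g' (a : Int) (b : Int) = gval g (a : Int) (b : Int)))

theorem gridOut_unique {r c : Int} {g g1 g2 : List (List Int)} {q : List (Int × Int)}
    (h1 : GridOut r c g q g1) (h2 : GridOut r c g q g2) : g1 = g2 := by
  obtain ⟨hl1, hr1, hv1⟩ := h1
  obtain ⟨hl2, hr2, hv2⟩ := h2
  apply List.ext_getElem (by omega)
  intro n hn1 hn2
  have hrow1 : g1.getD n [] = g1[n] := List.getD_eq_getElem g1 [] hn1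
  have hrow2 : g2.getD n [] = g2[n] := List.getD_eq_getElem g2 [] hn2
  apply List.ext_getElem
  · have := (hr1 n).trans (hr2 n).symm
    rw [hrow1, hrow2] at this
    omega
  intro b hb1 hb2
  have hv : gval g1 (n : Int) (b : Int) = gval g2 (n : Int) (b : Int) := by
    by_cases hc : Conn r c g q ((n : Int), (b : Int))
    · rw [(hv1 n b).1 hc, (hv2 n b).1 hc]
    · rw [(hv1 n b).2 hc, (hv2 n b).2 hc]
  unfold gval at hv
  simp only [Int.toNat_natCast] at hv
  rw [hrow1, hrow2, List.getD_eq_getElem _ _ hb1, List.getD_eq_getElem _ _ hb2] at hv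
  exact hv

theorem invQ_step {r c : Int} {g : List (List Int)} {x : Int × Int} {rest : List (Int × Int)}
    (hnd : rest.Nodup) (hx : Window r c x ∧ gval g x.1 x.2 = 0)
    (hrest : ∀ p ∈ rest, Window r c p ∧ gval g p.1 p.2 = 0) (hxr : x ∉ rest) :
    InvQ r c (zeroCells g (nbrs r c g x)) (rest ++ nbrs r c g x) := by
  have hdisj : ∀ p ∈ rest, p ∉ nbrs r c g x := by
    intro p hp hpN
    have h1 := (hrest p hp).2
    have h0 := (mem_nbrs.mp hpN).2.2.2.2.2
    rw [h1] at h0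
    norm_num at h0
  constructor
  · rw [List.nodup_append]
    exact ⟨hnd, nbrs_nodup r c g x, fun p hp q hq => fun e => hdisj p hp (e ▸ hq)⟩
  · intro p hp
    rcases List.mem_append.mp hp with hp | hp
    · refine ⟨(hrest p hp).1, ?_⟩
      have := gval_zeroCells_of_not_mem (l := nbrs r c g x) g nbrs_nonneg
        (hrest p hp).1.1 (hrest p hp).1.2.2.1 (by simpa using hdisj p hp)
      rw [this]
      exact (hrest p hp).2
    · have hGd := (mem_nbrs.mp hp).2
      exact ⟨⟨hGd.1, hGd.2.1, hGd.2.2.1, hGd.2.2.2.1⟩, gval_zeroCells_of_mem g hp⟩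

theorem x_not_mem_nbrs {r c : Int} {g : List (List Int)} {x : Int × Int}
    (hx0 : gval g x.1 x.2 = 0) : x ∉ nbrs r c g x := by
  intro hmem
  have := (mem_nbrs.mp hmem).2.2.2.2.2
  rw [hx0] at this
  norm_num at this

-- x is not rediscovered after being zeroed
theorem x_not_conn {r c : Int} {g : List (List Int)} {x : Int × Int} {rest : List (Int × Int)}
    (hnd : (x :: rest).Nodup) (hx : Window r c x ∧ gval g x.1 x.2 = 0) :
    ¬ Conn r c (zeroCells g (nbrs r c g x)) (rest ++ nbrs r c g x) x := by
  intro hconn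
  rcases conn_cases hconn with hmem | hGd
  · rcases List.mem_append.mp hmem with hmem | hmem
    · exact (List.nodup_cons.mp hnd).1 hmem
    · exact x_not_mem_nbrs hx.2 hmem
  · have hv := gval_zeroCells_of_not_mem (l := nbrs r c g x) g nbrs_nonneg
      hx.1.1 hx.1.2.2.1 (by simpa using x_not_mem_nbrs hx.2)
    have h5 := hGd.2.2.2.2
    rw [hv, hx.2] at h5
    norm_num at h5

theorem bfsA_spec (r c : Int) (g : List (List Int)) (tmp : PySem.Dict Int Int) (cnt : Int)
    (que : List (Int × Int)) (hq : InvQ r c g que) (htmp : tmp.keys.Nodup) :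
    ∃ P : List (Int × Int), P.Nodup ∧ (∀ p, p ∈ P ↔ Conn r c g que p) ∧
      (bfsA r c g tmp cnt que).2.2 = cnt + P.length - que.length ∧
      (∀ k, k ∈ (bfsA r c g tmp cnt que).2.1.keys ↔ k ∈ tmp.keys ∨ ∃ p ∈ P, p.2 = k) ∧
      (bfsA r c g tmp cnt que).2.1.keys.Nodup ∧
      GridOut r c g que (bfsA r c g tmp cnt que).1 := by
  revert hq htmp
  induction g, tmp, cnt, que using bfsA.induct r c with
  | case1 g tmp cnt =>
      intro hq htmp
      have h0 : bfsA r c g tmp cnt [] = (g, tmp, cnt) := by rw [bfsA]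
      refine ⟨[], List.nodup_nil, ?_, ?_, ?_, ?_, ?_⟩
      · intro p; simp [Conn]
      · simp [h0]
      · intro k; simp [h0]
      · simp [h0, htmp]
      · exact ⟨by rw [h0], fun n => by rw [h0],
          fun a b => ⟨fun hc => absurd hc (by simp [Conn]), fun _ => by rw [h0]⟩⟩
  | case2 g tmp cnt now rest tmp' s ih =>
      intro hq htmp
      obtain ⟨hnd, hcell⟩ := hq
      have hndr : rest.Nodup := (List.nodup_cons.mp hnd).2
      have hxr : now ∉ rest := (List.nodup_cons.mp hnd).1
      have hxw := hcell now List.mem_cons_self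
      have hrest : ∀ p ∈ rest, Window r c p ∧ gval g p.1 p.2 = 0 :=
        fun p hp => hcell p (List.mem_cons_of_mem _ hp)
      have hs : s = (zeroCells g (nbrs r c g now), cnt + (nbrs r c g now).length,
          rest ++ nbrs r c g now) := bfsStep_spec r c now g cnt rest
      have hs1 : s.1 = zeroCells g (nbrs r c g now) := by rw [hs]
      have hs21 : s.2.1 = cnt + (nbrs r c g now).length := by rw [hs]
      have hs22 : s.2.2 = rest ++ nbrs r c g now := by rw [hs]
      have htk : ∀ k, k ∈ tmp'.keys ↔ k = now.2 ∨ k ∈ tmp.keys := by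
        intro k
        show k ∈ (if _ : tmp.contains now.2 = true then tmp else tmp.insert now.2 1).keys ↔ _
        split
        · rename_i hcont
          constructor
          · exact Or.inr
          · rintro (rfl | h)
            · exact (PySem.Dict.contains_iff_mem_keys tmp now.2).mp hcont
            · exact h
        · exact PySem.Dict.mem_keys_insert tmp now.2 k 1
      have htmp' : tmp'.keys.Nodup := by
        show (if _ : tmp.contains now.2 = true then tmp else tmp.insert now.2 1).keys.Nodup
        split
        · exact htmp
        · exact PySem.Dict.nodup_keys_insert tmp now.2 1 htmp
      have hinv : InvQ r c s.1 s.2.2 := by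
        rw [hs1, hs22]
        exact invQ_step hndr hxw hrest hxr
      obtain ⟨P', hP'nd, hP'mem, hcnt, hkeys, hknd, hgrid⟩ := ih hinv htmp'
      have hbfs : bfsA r c g tmp cnt (now :: rest) = bfsA r c s.1 tmp' s.2.1 s.2.2 := by
        conv_lhs => rw [bfsA]
        rfl
      have hconn : ∀ p, Conn r c g (now :: rest) p ↔ p = now ∨ Conn r c s.1 s.2.2 p := by
        intro p
        rw [hs1, hs22]
        exact conn_step r c g now rest (rest ++ nbrs r c g now) (fun p => List.mem_append) p
      have hnotP' : now ∉ P' := by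
        intro hmem
        have hc := (hP'mem now).mp hmem
        rw [hs1, hs22] at hc
        exact x_not_conn hnd hxw hc
      refine ⟨now :: P', List.nodup_cons.mpr ⟨hnotP', hP'nd⟩, ?_, ?_, ?_, ?_, ?_⟩
      · intro p
        rw [List.mem_cons, hconn p, hP'mem p]
      · rw [hbfs, hcnt, hs21, hs22]
        simp only [List.length_append, List.length_cons]
        push_cast
        ring
      · intro k
        rw [hbfs, hkeys k, htk k]
        simp only [List.mem_cons]
        constructor
        · rintro ((rfl | h) | ⟨p, hp, rfl⟩)
          · exact Or.inr ⟨now, Or.inl rfl, rfl⟩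
          · exact Or.inl h
          · exact Or.inr ⟨p, Or.inr hp, rfl⟩
        · rintro (h | ⟨p, hp, rfl⟩)
          · exact Or.inl (Or.inr h)
          · rcases hp with rfl | hp
            · exact Or.inl (Or.inl rfl)
            · exact Or.inr ⟨p, hp, rfl⟩
      · rw [hbfs]
        exact hknd
      · obtain ⟨hl, hr, hv⟩ := hgrid
        rw [hbfs]
        refine ⟨?_, ?_, ?_⟩
        · rw [hl, hs1]; exact length_zeroCells (nbrs r c g now) g
        · intro n; rw [hr n, hs1]; exact rowlen_zeroCells (nbrs r c g now) g n
        · intro a b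
          have hnn1 : (0 : Int) ≤ (a : Int) := Int.natCast_nonneg a
          have hnn2 : (0 : Int) ≤ (b : Int) := Int.natCast_nonneg b
          constructor
          · intro hc
            rcases (hconn ((a : Int), (b : Int))).mp hc with heq | hc'
            · -- the popped cell itself: already zero and never re-written
              have hnc : ¬ Conn r c s.1 s.2.2 ((a : Int), (b : Int)) := by
                rw [hs1, hs22]
                rw [heq]
                exact x_not_conn hnd hxw
              have := (hv a b).2 hnc
              rw [this, hs1]
              have hnmem : ((a : Int), (b : Int)) ∉ nbrs r c g now := by
                rw [heq]
                exact x_not_mem_nbrs hxw.2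
              have := gval_zeroCells_of_not_mem (l := nbrs r c g now) g nbrs_nonneg
                hnn1 hnn2 hnmem
              rw [this]
              have ha : (a : Int) = now.1 := congrArg Prod.fst heq
              have hb : (b : Int) = now.2 := congrArg Prod.snd heq
              rw [ha, hb]
              exact hxw.2
            · exact (hv a b).1 hc'
          · intro hc
            have hne : ((a : Int), (b : Int)) ≠ now := fun heq => hc ((hconn _).mpr (Or.inl heq))
            have hnc : ¬ Conn r c s.1 s.2.2 ((a : Int), (b : Int)) :=
              fun h => hc ((hconn _).mpr (Or.inr h))
            have hnmem : ((a : Int), (b : Int)) ∉ nbrs r c g now := by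
              intro hmem
              apply hnc
              rw [hs22]
              exact ⟨_, List.mem_append.mpr (Or.inr hmem), Relation.ReflTransGen.refl⟩
            have h1 := (hv a b).2 hnc
            rw [h1, hs1]
            exact gval_zeroCells_of_not_mem (l := nbrs r c g now) g nbrs_nonneg hnn1 hnn2 hnmem


theorem dfsB_spec (r c : Int) (g : List (List Int)) (stack comp : List (Int × Int))
    (hq : InvQ r c g stack) :
    ∃ P : List (Int × Int), P.Nodup ∧ (∀ p, p ∈ P ↔ Conn r c g stack p) ∧
      (dfsB r c g stack comp).2 = comp ++ P ∧
      GridOut r c g stack (dfsB r c g stack comp).1 := by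
  revert hq
  induction g, stack, comp using dfsB.induct r c with
  | case1 g stack comp h =>
      intro hq
      have hnil : stack = [] := List.getLast?_eq_none_iff.mp h
      subst hnil
      have h0 : dfsB r c g [] comp = (g, comp) := by
        rw [dfsB]
        rfl
      refine ⟨[], List.nodup_nil, ?_, ?_, ?_⟩
      · intro p; simp [Conn]
      · simp [h0]
      · exact ⟨by rw [h0], fun n => by rw [h0],
          fun a b => ⟨fun hc => absurd hc (by simp [Conn]), fun _ => by rw [h0]⟩⟩
  | case2 g stack comp xy h rest s ih =>
      intro hq
      obtain ⟨l', hl'⟩ := List.getLast?_eq_some_iff.mp h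
      have hdrop : stack.dropLast = l' := by rw [hl']; exact List.dropLast_concat
      have hperm : stack.Perm (xy :: l') := by rw [hl']; exact List.perm_append_singleton xy l'
      have hmemst : ∀ p, p ∈ stack ↔ p ∈ xy :: l' := fun p => hperm.mem_iff
      obtain ⟨hndst, hcellst⟩ := hq
      have hnd : (xy :: l').Nodup := hperm.nodup_iff.mp hndst
      have hcell : ∀ p ∈ xy :: l', Window r c p ∧ gval g p.1 p.2 = 0 :=
        fun p hp => hcellst p ((hmemst p).mpr hp)
      have hndr : l'.Nodup := (List.nodup_cons.mp hnd).2
      have hxr : xy ∉ l' := (List.nodup_cons.mp hnd).1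
      have hxw := hcell xy List.mem_cons_self
      have hrest : ∀ p ∈ l', Window r c p ∧ gval g p.1 p.2 = 0 :=
        fun p hp => hcell p (List.mem_cons_of_mem _ hp)
      have hs : s = (zeroCells g (nbrs r c g xy), l' ++ nbrs r c g xy) := by
        show dfsStep r c xy.1 xy.2 (g, stack.dropLast) = _
        rw [hdrop]
        exact dfsStep_spec r c xy g l'
      have hs1 : s.1 = zeroCells g (nbrs r c g xy) := by rw [hs]
      have hs2 : s.2 = l' ++ nbrs r c g xy := by rw [hs]
      have hinv : InvQ r c s.1 s.2 := by
        rw [hs1, hs2]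
        exact invQ_step hndr hxw hrest hxr
      obtain ⟨P', hP'nd, hP'mem, hcomp, hgrid⟩ := ih hinv
      have hdfs : dfsB r c g stack comp = dfsB r c s.1 s.2 (comp ++ [xy]) := by
        conv_lhs => rw [dfsB]
        split
        · rename_i heq
          rw [h] at heq
          cases heq
        · rename_i zz heq
          rw [h] at heq
          cases heq
          rfl
      have hconn : ∀ p, Conn r c g stack p ↔ p = xy ∨ Conn r c s.1 s.2 p := by
        intro p
        rw [conn_congr hmemst p, hs1, hs2]
        exact conn_step r c g xy l' (l' ++ nbrs r c g xy) (fun p => List.mem_append) p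
      have hnotP' : xy ∉ P' := by
        intro hmem
        have hc := (hP'mem xy).mp hmem
        rw [hs1, hs2] at hc
        exact x_not_conn hnd hxw hc
      refine ⟨xy :: P', List.nodup_cons.mpr ⟨hnotP', hP'nd⟩, ?_, ?_, ?_⟩
      · intro p
        rw [List.mem_cons, hconn p, hP'mem p]
      · rw [hdfs, hcomp]
        simp
      · obtain ⟨hl, hr, hv⟩ := hgrid
        rw [hdfs]
        refine ⟨?_, ?_, ?_⟩
        · rw [hl, hs1]; exact length_zeroCells (nbrs r c g xy) g
        · intro n; rw [hr n, hs1]; exact rowlen_zeroCells (nbrs r c g xy) g n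
        · intro a b
          have hnn1 : (0 : Int) ≤ (a : Int) := Int.natCast_nonneg a
          have hnn2 : (0 : Int) ≤ (b : Int) := Int.natCast_nonneg b
          constructor
          · intro hc
            rcases (hconn ((a : Int), (b : Int))).mp hc with heq | hc'
            · have hnc : ¬ Conn r c s.1 s.2 ((a : Int), (b : Int)) := by
                rw [hs1, hs2, heq]
                exact x_not_conn hnd hxw
              have hval := (hv a b).2 hnc
              rw [hval, hs1]
              have hnmem : ((a : Int), (b : Int)) ∉ nbrs r c g xy := by
                rw [heq]
                exact x_not_mem_nbrs hxw.2
              have hz := gval_zeroCells_of_not_mem (l := nbrs r c g xy) g nbrs_nonneg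
                hnn1 hnn2 hnmem
              rw [hz]
              have ha : (a : Int) = xy.1 := congrArg Prod.fst heq
              have hb : (b : Int) = xy.2 := congrArg Prod.snd heq
              rw [ha, hb]
              exact hxw.2
            · exact (hv a b).1 hc'
          · intro hc
            have hnc : ¬ Conn r c s.1 s.2 ((a : Int), (b : Int)) :=
              fun hh => hc ((hconn _).mpr (Or.inr hh))
            have hnmem : ((a : Int), (b : Int)) ∉ nbrs r c g xy := by
              intro hmem
              apply hnc
              rw [hs2]
              exact ⟨_, List.mem_append.mpr (Or.inr hmem), Relation.ReflTransGen.refl⟩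
            have h1 := (hv a b).2 hnc
            rw [h1, hs1]
            exact gval_zeroCells_of_not_mem (l := nbrs r c g xy) g nbrs_nonneg hnn1 hnn2 hnmem


-- ---------- both fills agree: grid, size, column set ----------

theorem fill_eq (r c i j : Int) (g : List (List Int))
    (hw : 0 ≤ i ∧ i < r ∧ 0 ≤ j ∧ j < c) (h1 : gval g i j = 1) :
    (bfsA r c (gset0 g i j) PySem.Dict.empty 1 [(i, j)]).1
        = (dfsB r c (gset0 g i j) [(i, j)] []).1 ∧
    (bfsA r c (gset0 g i j) PySem.Dict.empty 1 [(i, j)]).2.2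
        = ((dfsB r c (gset0 g i j) [(i, j)] []).2.length : Int) ∧
    (∀ k, k ∈ (bfsA r c (gset0 g i j) PySem.Dict.empty 1 [(i, j)]).2.1.keys ↔
        k ∈ (dfsB r c (gset0 g i j) [(i, j)] []).2.map (·.2)) ∧
    (bfsA r c (gset0 g i j) PySem.Dict.empty 1 [(i, j)]).2.1.keys.Nodup ∧
    (∀ p ∈ (dfsB r c (gset0 g i j) [(i, j)] []).2, Window r c p) := by
  have hinv : InvQ r c (gset0 g i j) [(i, j)] := by
    refine ⟨by simp, ?_⟩
    intro p hp
    rcases List.mem_singleton.mp hp with rfl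
    exact ⟨⟨hw.1, hw.2.1, hw.2.2.1, hw.2.2.2⟩, gval_gset0_self g i j⟩
  have hek : (PySem.Dict.empty : PySem.Dict Int Int).keys = [] := rfl
  obtain ⟨PA, hAnd, hAmem, hAcnt, hAkeys, hAknd, hAgrid⟩ :=
    bfsA_spec r c (gset0 g i j) PySem.Dict.empty 1 [(i, j)] hinv (by rw [hek]; exact List.nodup_nil)
  obtain ⟨PB, hBnd, hBmem, hBcomp, hBgrid⟩ :=
    dfsB_spec r c (gset0 g i j) [(i, j)] [] hinv
  have hmem : ∀ p, p ∈ PA ↔ p ∈ PB := fun p => (hAmem p).trans (hBmem p).symm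
  have hperm : PA.Perm PB := (List.perm_ext_iff_of_nodup hAnd hBnd).mpr hmem
  have hcomp' : (dfsB r c (gset0 g i j) [(i, j)] []).2 = PB := by simpa using hBcomp
  refine ⟨gridOut_unique hAgrid hBgrid, ?_, ?_, hAknd, ?_⟩
  · rw [hAcnt, hcomp', hperm.length_eq]
    simp
  · intro k
    rw [hAkeys k, hcomp', hek]
    simp only [List.not_mem_nil, false_or, List.mem_map]
    constructor
    · rintro ⟨p, hp, rfl⟩; exact ⟨p, (hmem p).mp hp, rfl⟩
    · rintro ⟨p, hp, rfl⟩; exact ⟨p, (hmem p).mpr hp, rfl⟩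
  · intro p hp
    rw [hcomp'] at hp
    rcases conn_cases ((hBmem p).mp hp) with hm | hGd
    · rcases List.mem_singleton.mp hm with rfl
      exact ⟨hw.1, hw.2.1, hw.2.2.1, hw.2.2.2⟩
    · exact ⟨hGd.1, hGd.2.1, hGd.2.2.1, hGd.2.2.2.1⟩

-- ---------- amount bookkeeping ----------

theorem amount_fold (cnt : Int) : ∀ (K : List Int), K.Nodup → ∀ (am : List Int),
    (∀ k ∈ K, 0 ≤ k ∧ k.toNat < am.length) →
    ((K.foldl (fun a k => a.set k.toNat (a.getD k.toNat 0 + cnt)) am).length = am.length ∧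
     ∀ n : Nat, (K.foldl (fun a k => a.set k.toNat (a.getD k.toNat 0 + cnt)) am).getD n 0
        = am.getD n 0 + (if (n : Int) ∈ K then cnt else 0)) := by
  intro K
  induction K with
  | nil => intro _ am _; simp
  | cons k K ih =>
      intro hnd am hb
      obtain ⟨hkK, hKnd⟩ := List.nodup_cons.mp hnd
      obtain ⟨hk0, hklt⟩ := hb k List.mem_cons_self
      have hb' : ∀ k' ∈ K, 0 ≤ k' ∧ k'.toNat < (am.set k.toNat (am.getD k.toNat 0 + cnt)).length := by
        intro k' hk'
        rw [List.length_set]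
        exact hb k' (List.mem_cons_of_mem _ hk')
      obtain ⟨ihlen, ihval⟩ := ih hKnd (am.set k.toNat (am.getD k.toNat 0 + cnt)) hb'
      constructor
      · simp only [List.foldl_cons]
        rw [ihlen, List.length_set]
      · intro n
        simp only [List.foldl_cons]
        rw [ihval n]
        by_cases hn : n = k.toNat
        · have hnk : (n : Int) = k := by omega
          rw [hnk, hn, getD_set_self _ _ _ _ hklt, if_pos List.mem_cons_self, if_neg hkK]
          ring
        · rw [getD_set_ne _ _ _ (fun h => hn h.symm)]
          have hne : (n : Int) ≠ k := by omega
          by_cases hm : (n : Int) ∈ K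
          · rw [if_pos hm, if_pos (List.mem_cons_of_mem _ hm)]
          · rw [if_neg hm, if_neg (by simp [List.mem_cons, hne, hm])]

theorem comps_append_sum (comps : List (Int × PySem.Set Int)) (q : Int × PySem.Set Int)
    (j : Int) :
    (((comps ++ [q]).filter (fun pc => PySem.Set.contains pc.2 j)).map (·.1)).sum
      = ((comps.filter (fun pc => PySem.Set.contains pc.2 j)).map (·.1)).sum
        + (if j ∈ q.2 then q.1 else 0) := by
  rw [List.filter_append, List.map_append, List.sum_append]
  congr 1
  by_cases hm : j ∈ q.2
  · rw [if_pos hm]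
    simp [List.filter, hm]
  · rw [if_neg hm]
    simp [List.filter, hm]

theorem foldl_rel {α β γ : Type} (R : α → β → Prop) (P : γ → Prop) (f : α → γ → α)
    (g : β → γ → β)
    (hstep : ∀ x, P x → ∀ a b, R a b → R (f a x) (g b x)) :
    ∀ l : List γ, (∀ x ∈ l, P x) → ∀ a b, R a b → R (l.foldl f a) (l.foldl g b) := by
  intro l
  induction l with
  | nil => intro _ a b h; exact h
  | cons x l ih =>
      intro hl a b h
      simp only [List.foldl_cons]
      exact ih (fun y hy => hl y (List.mem_cons_of_mem _ hy)) _ _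
        (hstep x (hl x List.mem_cons_self) a b h)


-- ---------- the outer scan in lockstep ----------

def StRel (c : Int) (stA : List (List Int) × List Int)
    (stB : List (List Int) × List (Int × PySem.Set Int)) : Prop :=
  stA.1 = stB.1 ∧ stA.2.length = c.toNat ∧
  (∀ pc ∈ stB.2, ∀ k ∈ pc.2, 0 ≤ k ∧ k < c) ∧
  (∀ n : Nat, stA.2.getD n 0 =
    ((stB.2.filter (fun pc => PySem.Set.contains pc.2 (n : Int))).map (·.1)).sum)

theorem cell_step (r c i j : Int) (hi : 0 ≤ i ∧ i < r) (hj : 0 ≤ j ∧ j < c)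
    (stA : List (List Int) × List Int) (stB : List (List Int) × List (Int × PySem.Set Int))
    (hR : StRel c stA stB) :
    StRel c
      (if gval stA.1 i j = 1 then
        let out := bfsA r c (gset0 stA.1 i j) PySem.Dict.empty 1 [(i, j)]
        let amount' := out.2.1.keys.foldl
          (fun a k => a.set k.toNat (a.getD k.toNat 0 + out.2.2)) stA.2
        (out.1, amount')
       else stA)
      (if gval stB.1 i j = 1 then
        let out := dfsB r c (gset0 stB.1 i j) [(i, j)] []
        (out.1, stB.2 ++ [((out.2.length : Int), PySem.Set.ofList (out.2.map (·.2)))])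
       else stB) := by
  obtain ⟨gA, am⟩ := stA
  obtain ⟨gB, comps⟩ := stB
  obtain ⟨hg, hlen, hcols, hval⟩ := hR
  dsimp only at hg hlen hcols hval ⊢
  subst hg
  by_cases hcond : gval gA i j = 1
  · rw [if_pos hcond, if_pos hcond]
    obtain ⟨hgeq, hcnt, hkeys, hknd, hwinB⟩ :=
      fill_eq r c i j gA ⟨hi.1, hi.2, hj.1, hj.2⟩ hcond
    have hb : ∀ k ∈ (bfsA r c (gset0 gA i j) PySem.Dict.empty 1 [(i, j)]).2.1.keys,
        0 ≤ k ∧ k.toNat < am.length := by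
      intro k hk
      obtain ⟨p, hp, rfl⟩ := List.mem_map.mp ((hkeys k).mp hk)
      obtain ⟨_, _, h3, h4⟩ := hwinB p hp
      refine ⟨h3, ?_⟩
      rw [hlen]
      omega
    obtain ⟨hflen, hfval⟩ := amount_fold
      (bfsA r c (gset0 gA i j) PySem.Dict.empty 1 [(i, j)]).2.2
      (bfsA r c (gset0 gA i j) PySem.Dict.empty 1 [(i, j)]).2.1.keys hknd am hb
    refine ⟨hgeq, ?_, ?_, ?_⟩
    · rw [hflen, hlen]
    · intro pc hpc
      rcases List.mem_append.mp hpc with hpc | hpc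
      · exact hcols pc hpc
      · rcases List.mem_singleton.mp hpc with rfl
        intro k hk
        obtain ⟨p, hp, rfl⟩ := List.mem_map.mp ((PySem.Set.mem_ofList _ _).mp hk)
        obtain ⟨_, _, h3, h4⟩ := hwinB p hp
        exact ⟨h3, h4⟩
    · intro n
      rw [hfval n, hval n, comps_append_sum]
      congr 1
      have hmem : ((n : Int) ∈ (bfsA r c (gset0 gA i j) PySem.Dict.empty 1 [(i, j)]).2.1.keys)
          ↔ ((n : Int) ∈ PySem.Set.ofList
              ((dfsB r c (gset0 gA i j) [(i, j)] []).2.map (·.2))) := by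
        rw [hkeys ((n : Int))]
        exact (PySem.Set.mem_ofList _ _).symm
      by_cases hm : (n : Int) ∈ (bfsA r c (gset0 gA i j) PySem.Dict.empty 1 [(i, j)]).2.1.keys
      · rw [if_pos hm, if_pos (hmem.mp hm)]
        exact hcnt
      · rw [if_neg hm, if_neg (fun hh => hm (hmem.mpr hh))]
  · rw [if_neg hcond, if_neg hcond]
    exact ⟨rfl, hlen, hcols, hval⟩

-- ===== VERDICT (by name: the statement is the Claim_ definition above) =====
theorem solution_spec : Claim_equal_solution := by
  unfold Claim_equal_solution
  intro land _ _
  unfold Spec_solution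
  simp only [solution, solution_alt]
  have hinit : StRel ((land.getD 0 []).length : Int)
      (land, (PySem.List.pyRange 0 ((land.getD 0 []).length : Int) 1).map (fun _ => (0 : Int)))
      (land, ([] : List (Int × PySem.Set Int))) := by
    refine ⟨rfl, ?_, by simp, ?_⟩
    · simp [PySem.List.length_pyRange_one]
    · intro n
      have := getD_map' (fun _ => (0 : Int))
        (PySem.List.pyRange 0 ((land.getD 0 []).length : Int) 1) n 0
      simp only at this
      rw [this]
      simp
  have hmain := foldl_rel (StRel ((land.getD 0 []).length : Int))
    (fun i => 0 ≤ i ∧ i < (land.length : Int))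
    (fun st i =>
      (PySem.List.pyRange 0 ((land.getD 0 []).length : Int) 1).foldl (fun st j =>
        if gval st.1 i j = 1 then
          let out := bfsA (land.length : Int) ((land.getD 0 []).length : Int)
            (gset0 st.1 i j) PySem.Dict.empty 1 [(i, j)]
          let amount' := out.2.1.keys.foldl
            (fun a k => a.set k.toNat (a.getD k.toNat 0 + out.2.2)) st.2
          (out.1, amount')
        else st) st)
    (fun st i =>
      (PySem.List.pyRange 0 ((land.getD 0 []).length : Int) 1).foldl (fun st j =>
        if gval st.1 i j = 1 then
          let out := dfsB (land.length : Int) ((land.getD 0 []).length : Int)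
            (gset0 st.1 i j) [(i, j)] []
          (out.1, st.2 ++ [((out.2.length : Int), PySem.Set.ofList (out.2.map (·.2)))])
        else st) st)
    (by
      intro i hi a b hR
      exact foldl_rel (StRel ((land.getD 0 []).length : Int))
        (fun j => 0 ≤ j ∧ j < ((land.getD 0 []).length : Int)) _ _
        (fun j hj a b hR => cell_step (land.length : Int) ((land.getD 0 []).length : Int)
          i j hi hj a b hR)
        (PySem.List.pyRange 0 ((land.getD 0 []).length : Int) 1)
        (fun x hx => (PySem.List.mem_pyRange_one.mp hx))
        a b hR)
    (PySem.List.pyRange 0 (land.length : Int) 1)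
    (fun x hx => (PySem.List.mem_pyRange_one.mp hx))
    _ _ hinit
  obtain ⟨hgeq, hlen, hcols, hval⟩ := hmain
  congr 1
  congr 1
  apply List.ext_getElem
  · rw [hlen]
    simp [PySem.List.length_pyRange_one]
  · intro n h1 h2
    rw [← List.getD_eq_getElem _ 0 h1, hval n, List.getElem_map,
      PySem.List.getElem_pyRange_one]
    simp
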